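-- pv_equiv track=rewrite | github.com/rapsby/programmers | codingtest/게임아이템.py | solution
-- ===== SOURCE A (Python) =====
-- from queue import PriorityQueue
--
-- def solution(healths, items):
--     answer = []
--     items = [[item[1], item[0], i+1] for i, item in enumerate(items)]
--     items.sort()
--     healths.sort()
--     pq = PriorityQueue()
--     start = 0
--     for health in healths:
--         for item in items[start:]:
--             hp, power, i= item
--             if health - hp < 100:
--                 break
--             pq.put((-power, i))
--             start += 1
--         if not pq.empty():
--             _, i = pq.get()
--             answer.append(i)
--     return sorted(answer)
-- ===== SOURCE B (Python) =====
-- def solution(healths, items):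
--     # No priority queue, no two-pointer: sort healths in place (same side effect as A),
--     # keep a list of remaining (defense, power, index) triples and, for each health in
--     # ascending order, scan it for the affordable item of maximum power (first = smallest
--     # original index on ties), remove it and record its 1-based index.
--     healths.sort()
--     remaining = [(it[1], it[0], i + 1) for i, it in enumerate(items)]
--     answer = []
--     for health in healths:
--         best = None
--         for t in remaining:
--             if health - t[0] >= 100 and (best is None or t[1] > best[1]):
--                 best = t
--         if best is not None:
--             remaining.remove(best)
--             answer.append(best[2])
--     return sorted(answer)
-- ===== Notes on version B (the rewrite author's own statement) =====
-- stated objective: simpler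
-- what changed: Replaces the items sort, the two-pointer frontier and the PriorityQueue with a plain per-health linear scan of the remaining (defense, power, index) triples for the affordable item of maximum power (first occurrence = smallest index), which is then removed from the list.
import Mathlib
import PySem

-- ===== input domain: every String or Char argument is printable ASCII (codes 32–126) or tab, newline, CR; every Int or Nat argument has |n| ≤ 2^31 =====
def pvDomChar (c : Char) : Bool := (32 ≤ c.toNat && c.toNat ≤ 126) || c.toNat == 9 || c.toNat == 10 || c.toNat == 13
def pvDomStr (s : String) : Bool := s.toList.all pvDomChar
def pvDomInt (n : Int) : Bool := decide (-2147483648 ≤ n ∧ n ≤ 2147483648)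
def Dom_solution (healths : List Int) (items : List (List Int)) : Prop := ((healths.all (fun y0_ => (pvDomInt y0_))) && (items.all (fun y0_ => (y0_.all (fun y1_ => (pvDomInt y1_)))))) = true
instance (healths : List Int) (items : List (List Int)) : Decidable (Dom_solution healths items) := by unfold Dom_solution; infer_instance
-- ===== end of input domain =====

-- B drops A's PriorityQueue, item sort and two-pointer for a per-health linear scan of the
-- remaining items (simpler, not faster). Both A and B sort `healths` in place (same side
-- effect); neither mutates `items`; the equivalence proved is about the return value.

-- ===== PORT A =====
-- Python's 3-element lists [defense, power, i+1] are ported as triples (same contents,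
-- same lexicographic comparison order).

-- lexicographic ≤ on priority-queue entries (-power, index)
def pvPairLe (a b : Int × Int) : Bool :=
  a.1 < b.1 || (a.1 == b.1 && a.2 ≤ b.2)

-- lexicographic ≤ on (defense, power, index) triples = Python's comparison of the 3-lists
def pvTripLe (a b : Int × Int × Int) : Bool :=
  a.1 < b.1 || (a.1 == b.1 && (a.2.1 < b.2.1 || (a.2.1 == b.2.1 && a.2.2 ≤ b.2.2)))

-- PriorityQueue has no PySem counterpart: ported by hand as a lex-sorted list
-- (put = sorted insert, get = head).  Exact: entries are distinct (distinct indices).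
def pvPqInsert (x : Int × Int) : List (Int × Int) → List (Int × Int)
  | [] => [x]
  | y :: ys => if pvPairLe x y then x :: y :: ys else y :: pvPqInsert x ys

-- items.sort(): Python sorts the 3-lists lexicographically; no PySem sort applies to a
-- lex-ordered triple key, so the sort is written out (insertion sort under the same order;
-- exact: all keys are distinct in the index component, so any correct sort agrees).
def pvSortInsert (x : Int × Int × Int) : List (Int × Int × Int) → List (Int × Int × Int)
  | [] => [x]
  | y :: ys => if pvTripLe x y then x :: y :: ys else y :: pvSortInsert x ys

def pvSortTrips : List (Int × Int × Int) → List (Int × Int × Int)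
  | [] => []
  | t :: ts => pvSortInsert t (pvSortTrips ts)

-- inner loop `for item in items[start:]: … if health - hp < 100: break; pq.put(…); start += 1`
def pvPushLoop (h : Int) : List (Int × Int × Int) → List (Int × Int) → Nat → List (Int × Int) × Nat
  | [], pq, start => (pq, start)
  | t :: ts, pq, start =>
    if h - t.1 < 100 then (pq, start)
    else pvPushLoop h ts (pvPqInsert (-t.2.1, t.2.2) pq) (start + 1)

-- one iteration of `for health in healths` (state = (start, pq, answer))
def pvStepA (sitems : List (Int × Int × Int)) (s : Nat × List (Int × Int) × List Int) (h : Int) :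
    Nat × List (Int × Int) × List Int :=
  match pvPushLoop h (sitems.drop s.1) s.2.1 s.1 with
  | (pq', start') =>
    match pq' with
    | [] => (start', pq', s.2.2)
    | x :: rest => (start', rest, s.2.2 ++ [x.2])

def solution (healths : List Int) (items : List (List Int)) : List Int :=
  -- items = [[item[1], item[0], i+1] for i, item in enumerate(items)]
  -- (pyGetD defaults are never reached on Pre_ inputs: every item has length ≥ 2)
  let trips := (PySem.List.enumerate items).map
      (fun p => (PySem.List.pyGetD p.2 1 0, PySem.List.pyGetD p.2 0 0, p.1 + 1))
  let sitems := pvSortTrips trips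
  let hs := PySem.List.sorted healths (fun x => x) false
  let fin := hs.foldl (pvStepA sitems) (0, [], [])
  PySem.List.sorted fin.2.2 (fun x => x) false

-- ===== PORT B =====
-- best = None; for t in remaining: if health - t[0] >= 100 and (best is None or t[1] > best[1]): best = t
def pvBest (h : Int) (rem : List (Int × Int × Int)) : Option (Int × Int × Int) :=
  rem.foldl
    (fun b t =>
      if 100 ≤ h - t.1 then
        match b with
        | none => some t
        | some u => if u.2.1 < t.2.1 then some t else b
      else b)
    none

-- one iteration of B's `for health in healths` (state = (answer, remaining));
-- remaining.remove(best): best is an element of remaining, so List.erase is exact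
def pvStepB (s : List Int × List (Int × Int × Int)) (h : Int) : List Int × List (Int × Int × Int) :=
  match pvBest h s.2 with
  | none => s
  | some m => (s.1 ++ [m.2.2], s.2.erase m)

def solution_alt (healths : List Int) (items : List (List Int)) : List Int :=
  let rem := (PySem.List.enumerate items).map
      (fun p => (PySem.List.pyGetD p.2 1 0, PySem.List.pyGetD p.2 0 0, p.1 + 1))
  let hs := PySem.List.sorted healths (fun x => x) false
  let fin := hs.foldl pvStepB ([], rem)
  PySem.List.sorted fin.1 (fun x => x) false

-- ===== PRECONDITION & SPEC =====
-- A raises IndexError (item[1]) exactly when some item has fewer than 2 entries.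
def Pre_solution (healths : List Int) (items : List (List Int)) : Prop :=
  ∀ it ∈ items, 2 ≤ it.length
instance (healths : List Int) (items : List (List Int)) : Decidable (Pre_solution healths items) := by
  unfold Pre_solution; infer_instance

def pvWitness_solution : List Int × List (List Int) := ([200, 140], [[3, 1], [5, 100]])

def Spec_solution (healths : List Int) (items : List (List Int)) (out : List Int) : Prop := out = solution_alt healths items
instance (healths : List Int) (items : List (List Int)) (out : List Int) : Decidable (Spec_solution healths items out) := by unfold Spec_solution; infer_instance

-- ===== CLAIM (what is proved, stated in full; the proofs are below) =====
def Claim_equal_solution : Prop := ∀ (healths : List Int) (items : List (List Int)), Dom_solution healths items → Pre_solution healths items → Spec_solution healths items (solution healths items)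

-- ===== LEMMAS AND PROOFS =====

-- the pq entry of a triple: (-power, index)
def pvPair (t : Int × Int × Int) : Int × Int := (-t.2.1, t.2.2)

-- affordability of a triple under health h
def pvAff (h : Int) (t : Int × Int × Int) : Bool := decide (100 ≤ h - t.1)

-- ---- order basics ----
lemma pvPairLe_refl (a : Int × Int) : pvPairLe a a = true := by
  simp [pvPairLe]

lemma pvPairLe_total {a b : Int × Int} (h : pvPairLe a b = false) : pvPairLe b a = true := by
  simp [pvPairLe] at *; omega

lemma pvPairLe_antisymm {a b : Int × Int} (h1 : pvPairLe a b = true) (h2 : pvPairLe b a = true) :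
    a = b := by
  simp [pvPairLe] at h1 h2
  have : a.1 = b.1 ∧ a.2 = b.2 := by omega
  exact Prod.ext this.1 this.2

lemma pvPairLe_trans {a b c : Int × Int} (h1 : pvPairLe a b = true) (h2 : pvPairLe b c = true) :
    pvPairLe a c = true := by
  simp [pvPairLe] at *; omega

lemma pvTripLe_total {a b : Int × Int × Int} (h : pvTripLe a b = false) : pvTripLe b a = true := by
  simp [pvTripLe] at *; omega

lemma pvTripLe_hp {a b : Int × Int × Int} (h : pvTripLe a b = true) : a.1 ≤ b.1 := by
  simp [pvTripLe] at h; omega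

-- ---- pq insertion ----
lemma pvPqInsert_perm (x : Int × Int) (l : List (Int × Int)) :
    (pvPqInsert x l).Perm (x :: l) := by
  induction l with
  | nil => simp [pvPqInsert]
  | cons y ys ih =>
    by_cases h : pvPairLe x y = true
    · simp [pvPqInsert, h]
    · simp only [pvPqInsert, h, Bool.false_eq_true, if_false]
      exact ((ih.cons y).trans (List.Perm.swap x y ys))

lemma pvPqInsert_pairwise (x : Int × Int) {l : List (Int × Int)}
    (hl : l.Pairwise (fun a b => pvPairLe a b = true)) :
    (pvPqInsert x l).Pairwise (fun a b => pvPairLe a b = true) := by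
  induction l with
  | nil => simp [pvPqInsert]
  | cons y ys ih =>
    rcases List.pairwise_cons.mp hl with ⟨hy, hys⟩
    by_cases h : pvPairLe x y = true
    · rw [pvPqInsert, if_pos h]
      refine List.pairwise_cons.mpr ⟨?_, hl⟩
      intro z hz
      rcases List.mem_cons.mp hz with rfl | hz
      · exact h
      · exact pvPairLe_trans h (hy z hz)
    · have hyx : pvPairLe y x = true := pvPairLe_total (by simpa using h)
      rw [pvPqInsert, if_neg (by simp [h])]
      refine List.pairwise_cons.mpr ⟨?_, ih hys⟩
      intro z hz
      have := (pvPqInsert_perm x ys).mem_iff.mp hz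
      rcases List.mem_cons.mp this with rfl | hz'
      · exact hyx
      · exact hy z hz'

-- ---- the insertion sort of A ----
lemma pvSortInsert_perm (x : Int × Int × Int) (l : List (Int × Int × Int)) :
    (pvSortInsert x l).Perm (x :: l) := by
  induction l with
  | nil => simp [pvSortInsert]
  | cons y ys ih =>
    by_cases h : pvTripLe x y = true
    · simp [pvSortInsert, h]
    · rw [pvSortInsert, if_neg (by simp [h])]
      exact ((ih.cons y).trans (List.Perm.swap x y ys))

lemma pvSortInsert_pairwise (x : Int × Int × Int) {l : List (Int × Int × Int)}
    (hl : l.Pairwise (fun a b => pvTripLe a b = true)) :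
    (pvSortInsert x l).Pairwise (fun a b => pvTripLe a b = true) := by
  induction l with
  | nil => simp [pvSortInsert]
  | cons y ys ih =>
    rcases List.pairwise_cons.mp hl with ⟨hy, hys⟩
    by_cases h : pvTripLe x y = true
    · rw [pvSortInsert, if_pos h]
      refine List.pairwise_cons.mpr ⟨?_, hl⟩
      intro z hz
      rcases List.mem_cons.mp hz with rfl | hz
      · exact h
      · have := hy z hz
        simp [pvTripLe] at h this ⊢; omega
    · have hyx : pvTripLe y x = true := pvTripLe_total (by simpa using h)
      rw [pvSortInsert, if_neg (by simp [h])]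
      refine List.pairwise_cons.mpr ⟨?_, ih hys⟩
      intro z hz
      have := (pvSortInsert_perm x ys).mem_iff.mp hz
      rcases List.mem_cons.mp this with rfl | hz'
      · exact hyx
      · exact hy z hz'

lemma pvSortTrips_perm (l : List (Int × Int × Int)) : (pvSortTrips l).Perm l := by
  induction l with
  | nil => simp [pvSortTrips]
  | cons t ts ih => exact (pvSortInsert_perm t (pvSortTrips ts)).trans (ih.cons t)

lemma pvSortTrips_pairwise (l : List (Int × Int × Int)) :
    (pvSortTrips l).Pairwise (fun a b => pvTripLe a b = true) := by
  induction l with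
  | nil => simp [pvSortTrips]
  | cons t ts ih => exact pvSortInsert_pairwise t ih

-- ---- the enumerate-built triple list has strictly increasing indices ----
lemma pv_enum_fst_ge {α : Type} : ∀ (xs : List α) (s : Int) (a : Int × α),
    a ∈ PySem.List.enumerate xs s → s ≤ a.1 := by
  intro xs
  induction xs with
  | nil => intro s a ha; simp [PySem.List.enumerate_nil] at ha
  | cons x xs ih =>
    intro s a ha
    rw [PySem.List.enumerate_cons] at ha
    rcases List.mem_cons.mp ha with rfl | ha
    · exact le_refl _
    · have := ih (s + 1) a ha; omega

lemma pv_enum_fst_lt {α : Type} : ∀ (xs : List α) (s : Int),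
    (PySem.List.enumerate xs s).Pairwise (fun a b => a.1 < b.1) := by
  intro xs
  induction xs with
  | nil => intro s; simp [PySem.List.enumerate_nil]
  | cons x xs ih =>
    intro s
    rw [PySem.List.enumerate_cons]
    refine List.pairwise_cons.mpr ⟨?_, ih (s + 1)⟩
    intro b hb
    have := pv_enum_fst_ge xs (s + 1) b hb
    omega

def pvTrips (items : List (List Int)) : List (Int × Int × Int) :=
  (PySem.List.enumerate items).map
    (fun p => (PySem.List.pyGetD p.2 1 0, PySem.List.pyGetD p.2 0 0, p.1 + 1))

lemma pvTrips_idx (items : List (List Int)) :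
    (pvTrips items).Pairwise (fun a b => a.2.2 < b.2.2) := by
  unfold pvTrips
  rw [List.pairwise_map]
  exact (pv_enum_fst_lt items 0).imp (by intro a b h; simpa using h)

-- ---- the push loop ----
lemma pvPushLoop_eq (h : Int) (l : List (Int × Int × Int)) (pq : List (Int × Int)) (s : Nat) :
    pvPushLoop h l pq s =
      ((l.takeWhile (pvAff h)).foldl (fun q t => pvPqInsert (pvPair t) q) pq,
       s + (l.takeWhile (pvAff h)).length) := by
  induction l generalizing pq s with
  | nil => simp [pvPushLoop]
  | cons t ts ih =>
    by_cases hc : h - t.1 < 100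
    · have ha : pvAff h t = false := by simp [pvAff]; omega
      simp [pvPushLoop, hc, ha]
    · have ha : pvAff h t = true := by simp [pvAff]; omega
      rw [pvPushLoop, if_neg hc, ih, List.takeWhile_cons_of_pos ha]
      simp [pvPair]
      omega

lemma pvFoldInsert_perm (ts : List (Int × Int × Int)) (pq : List (Int × Int)) :
    (ts.foldl (fun q t => pvPqInsert (pvPair t) q) pq).Perm (pq ++ ts.map pvPair) := by
  induction ts generalizing pq with
  | nil => simp
  | cons t ts ih =>
    rw [List.foldl_cons, List.map_cons]
    refine (ih (pvPqInsert (pvPair t) pq)).trans ?_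
    refine (List.Perm.append_right _ (pvPqInsert_perm _ _)).trans ?_
    exact List.perm_middle.symm

lemma pvFoldInsert_pairwise (ts : List (Int × Int × Int)) {pq : List (Int × Int)}
    (hpq : pq.Pairwise (fun a b => pvPairLe a b = true)) :
    (ts.foldl (fun q t => pvPqInsert (pvPair t) q) pq).Pairwise
      (fun a b => pvPairLe a b = true) := by
  induction ts generalizing pq with
  | nil => exact hpq
  | cons t ts ih => exact ih (pvPqInsert_pairwise _ hpq)

lemma pvDropWhile_fails (h : Int) {l : List (Int × Int × Int)}
    (hl : l.Pairwise (fun a b => a.1 ≤ b.1)) :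
    ∀ u ∈ l.dropWhile (pvAff h), pvAff h u = false := by
  induction l with
  | nil => simp
  | cons t ts ih =>
    rcases List.pairwise_cons.mp hl with ⟨ht, hts⟩
    by_cases ha : pvAff h t = true
    · rw [List.dropWhile_cons_of_pos ha]; exact ih hts
    · rw [List.dropWhile_cons_of_neg ha]
      intro u hu
      rcases List.mem_cons.mp hu with rfl | hu
      · simpa using ha
      · have h1 := ht u hu
        simp [pvAff] at ha ⊢
        omega

-- ---- B's selection ----
def pvSelStep (b : Option (Int × Int × Int)) (t : Int × Int × Int) : Option (Int × Int × Int) :=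
  match b with
  | none => some t
  | some u => if u.2.1 < t.2.1 then some t else b

lemma pvSelStep_none (t : Int × Int × Int) : pvSelStep none t = some t := rfl

lemma pvSelStep_some (u t : Int × Int × Int) :
    pvSelStep (some u) t = if u.2.1 < t.2.1 then some t else some u := rfl

lemma pvBest_filter (h : Int) (rem : List (Int × Int × Int)) :
    pvBest h rem = (rem.filter (pvAff h)).foldl pvSelStep none := by
  unfold pvBest
  generalize (none : Option (Int × Int × Int)) = b
  induction rem generalizing b with
  | nil => simp
  | cons t ts ih =>
    by_cases hc : 100 ≤ h - t.1
    · have ha : pvAff h t = true := by simp [pvAff, hc]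
      rw [List.foldl_cons, List.filter_cons_of_pos ha, List.foldl_cons, if_pos hc]
      rw [ih]
      rfl
    · have ha : pvAff h t = false := by simp [pvAff, hc]
      rw [List.foldl_cons, List.filter_cons_of_neg (by simp [ha]), if_neg hc]
      exact ih b

lemma pvSelGo_spec : ∀ (l : List (Int × Int × Int)) (u : Int × Int × Int),
    ((u :: l).Pairwise (fun a b => a.2.2 < b.2.2)) →
    ∃ m, l.foldl pvSelStep (some u) = some m ∧ m ∈ u :: l ∧
      ∀ x ∈ u :: l, pvPairLe (pvPair m) (pvPair x) = true := by
  intro l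
  induction l with
  | nil =>
    intro u _
    exact ⟨u, rfl, List.mem_singleton.mpr rfl, by
      intro x hx; rcases List.mem_singleton.mp hx with rfl; exact pvPairLe_refl _⟩
  | cons t l ih =>
    intro u hidx
    rcases List.pairwise_cons.mp hidx with ⟨hu, htl⟩
    have hut : u.2.2 < t.2.2 := hu t List.mem_cons_self
    rw [List.foldl_cons, pvSelStep_some]
    by_cases hp : u.2.1 < t.2.1
    · rw [if_pos hp]
      obtain ⟨m, hm, hmem, hmin⟩ := ih t htl
      refine ⟨m, hm, List.mem_cons_of_mem _ hmem, ?_⟩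
      intro x hx
      rcases List.mem_cons.mp hx with rfl | hx
      · have h1 := hmin t List.mem_cons_self
        simp [pvPair, pvPairLe] at h1 ⊢
        omega
      · exact hmin x hx
    · rw [if_neg hp]
      have hidx' : (u :: l).Pairwise (fun a b => a.2.2 < b.2.2) := by
        refine List.pairwise_cons.mpr ⟨?_, (List.pairwise_cons.mp htl).2⟩
        intro x hx; exact hu x (List.mem_cons_of_mem _ hx)
      obtain ⟨m, hm, hmem, hmin⟩ := ih u hidx'
      refine ⟨m, hm, ?_, ?_⟩
      · rcases List.mem_cons.mp hmem with rfl | hmem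
        · exact List.mem_cons_self
        · exact List.mem_cons_of_mem _ (List.mem_cons_of_mem _ hmem)
      · intro x hx
        rcases List.mem_cons.mp hx with rfl | hx
        · exact hmin _ List.mem_cons_self
        rcases List.mem_cons.mp hx with rfl | hx
        · have h1 := hmin _ List.mem_cons_self
          simp [pvPair, pvPairLe] at h1 ⊢
          omega
        · exact hmin x (List.mem_cons_of_mem _ hx)

lemma pvBestAff_spec {l : List (Int × Int × Int)}
    (hne : l ≠ []) (hidx : l.Pairwise (fun a b => a.2.2 < b.2.2)) :
    ∃ m, l.foldl pvSelStep none = some m ∧ m ∈ l ∧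
      ∀ u ∈ l, pvPairLe (pvPair m) (pvPair u) = true := by
  rcases l with _ | ⟨u, l⟩
  · exact absurd rfl hne
  rw [List.foldl_cons, pvSelStep_none]
  exact pvSelGo_spec l u hidx

-- ---- filter/perm toolkit ----
lemma pvFilter_or_perm {α : Type} (p q : α → Bool) (l : List α)
    (hd : ∀ x ∈ l, ¬(p x = true ∧ q x = true)) :
    (l.filter (fun x => p x || q x)).Perm (l.filter p ++ l.filter q) := by
  induction l with
  | nil => simp
  | cons x l ih =>
    have hd' : ∀ y ∈ l, ¬(p y = true ∧ q y = true) := fun y hy => hd y (List.mem_cons_of_mem _ hy)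
    by_cases hp : p x = true
    · have hq : q x = false := by
        have h0 := hd x List.mem_cons_self
        simp [hp] at h0
        simpa using h0
      rw [List.filter_cons_of_pos (by simp [hp]), List.filter_cons_of_pos hp,
        List.filter_cons_of_neg (by simp [hq])]
      exact ((ih hd').cons x)
    · have hp' : p x = false := by simpa using hp
      by_cases hq : q x = true
      · rw [List.filter_cons_of_pos (by simp [hq]), List.filter_cons_of_neg (by simp [hp']),
          List.filter_cons_of_pos hq]
        exact ((ih hd').cons x).trans List.perm_middle.symm
      · have hq' : q x = false := by simpa using hq
        rw [List.filter_cons_of_neg (by simp [hp', hq']), List.filter_cons_of_neg (by simp [hp']),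
          List.filter_cons_of_neg (by simp [hq'])]
        exact ih hd'

-- ===== main loop equivalence =====
lemma pvLoops_eq (trips sitems : List (Int × Int × Int))
    (ST : sitems.Pairwise (fun a b => pvTripLe a b = true))
    (TI : trips.Pairwise (fun a b => a.2.2 < b.2.2))
    (SP : sitems.Perm trips) :
    ∀ (hs : List Int) (start : Nat) (pq : List (Int × Int))
      (rem : List (Int × Int × Int)) (ans : List Int),
      hs.Pairwise (· ≤ ·) →
      pq.Pairwise (fun a b => pvPairLe a b = true) →
      pq.Perm ((rem.filter (fun t => decide (t ∈ sitems.take start))).map pvPair) →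
      (∀ t ∈ sitems.take start, ∀ h ∈ hs, t.1 + 100 ≤ h) →
      (∀ t ∈ sitems.drop start, t ∈ rem) →
      rem.Sublist trips →
      (hs.foldl (pvStepA sitems) (start, pq, ans)).2.2 = (hs.foldl pvStepB (ans, rem)).1 := by
  have TN : trips.Nodup := TI.imp (fun {a b} hab => by intro he; subst he; omega)
  have SN : sitems.Nodup := SP.nodup_iff.mpr TN
  have SHP : sitems.Pairwise (fun a b => a.1 ≤ b.1) := ST.imp (fun {a b} hab => pvTripLe_hp hab)
  intro hs
  induction hs with
  | nil => intro start pq rem ans _ _ _ _ _ _; rfl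
  | cons h hs ih =>
    intro start pq rem ans hhs hpq hperm hafford hdrop hsub
    rcases List.pairwise_cons.mp hhs with ⟨hhead, htail⟩
    have remNodup : rem.Nodup := TN.sublist hsub
    have remIdx : rem.Pairwise (fun a b => a.2.2 < b.2.2) := TI.sublist hsub
    set tw := (sitems.drop start).takeWhile (pvAff h) with htw
    set k := tw.length with hk
    set start1 := start + k with hstart1
    set pq1 := tw.foldl (fun q t => pvPqInsert (pvPair t) q) pq with hpq1def
    have F_take : sitems.take start1 = sitems.take start ++ tw := by
      rw [hstart1, List.take_add]
      congr 1
      exact (List.prefix_iff_eq_take.mp (List.takeWhile_prefix _)).symm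
    have F_drop : sitems.drop start1 = (sitems.drop start).dropWhile (pvAff h) := by
      have hsplit0 : sitems.drop start = tw ++ (sitems.drop start).dropWhile (pvAff h) := by
        rw [htw]
        exact (List.takeWhile_append_dropWhile ..).symm
      rw [hstart1, ← List.drop_drop]
      conv_lhs => rw [hsplit0]
      rw [hk, List.drop_left]
    have F_pushed_aff : ∀ t ∈ tw, pvAff h t = true := fun t ht => List.mem_takeWhile_imp ht
    have F_dw_fails : ∀ u ∈ (sitems.drop start).dropWhile (pvAff h), pvAff h u = false :=
      pvDropWhile_fails h (SHP.sublist (List.drop_sublist _ _))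
    have tw_sub : tw.Sublist sitems :=
      ((List.takeWhile_prefix _).sublist).trans (List.drop_sublist _ _)
    have P1 : pq1.Pairwise (fun a b => pvPairLe a b = true) := pvFoldInsert_pairwise tw hpq
    have P2 : pq1.Perm (pq ++ tw.map pvPair) := pvFoldInsert_perm tw pq
    -- on rem, membership in the pushed prefix is exactly affordability under h
    have Miff : ∀ t ∈ rem, (decide (t ∈ sitems.take start1) : Bool) = pvAff h t := by
      intro t htr
      by_cases hmem : t ∈ sitems.take start1
      · simp only [hmem, decide_true]
        rw [F_take] at hmem
        rcases List.mem_append.mp hmem with h1 | h1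
        · have h9 := hafford t h1 h List.mem_cons_self
          have h10 : (100:Int) ≤ h - t.1 := by omega
          simp [pvAff, h10]
        · exact (F_pushed_aff t h1).symm
      · simp only [hmem, decide_false]
        have hts : t ∈ sitems := SP.mem_iff.mpr (hsub.subset htr)
        rw [← List.take_append_drop start1 sitems] at hts
        rcases List.mem_append.mp hts with h1 | h1
        · exact absurd h1 hmem
        · rw [F_drop] at h1
          exact (F_dw_fails t h1).symm
    have E1 : rem.filter (fun t => decide (t ∈ sitems.take start1)) = rem.filter (pvAff h) :=
      List.filter_congr Miff
    have hsplit : rem.filter (fun t => decide (t ∈ sitems.take start1)) =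
        rem.filter (fun t => decide (t ∈ sitems.take start) || decide (t ∈ tw)) := by
      apply List.filter_congr
      intro t _
      simp [F_take, List.mem_append]
    have hdisj : ∀ x ∈ rem,
        ¬((decide (x ∈ sitems.take start) : Bool) = true ∧ (decide (x ∈ tw) : Bool) = true) := by
      intro x _ hx
      rcases hx with ⟨h1, h2⟩
      simp only [decide_eq_true_eq] at h1 h2
      exact (List.disjoint_take_drop SN (le_refl start)) h1
        ((List.takeWhile_prefix _).subset h2)
    have hor := pvFilter_or_perm (fun t => decide (t ∈ sitems.take start))
      (fun t => decide (t ∈ tw)) rem hdisj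
    have htwperm : (rem.filter (fun t => decide (t ∈ tw))).Perm tw := by
      rw [List.perm_ext_iff_of_nodup (remNodup.filter _) (SN.sublist tw_sub)]
      intro a
      simp only [List.mem_filter, decide_eq_true_eq]
      constructor
      · exact fun ha => ha.2
      · intro ha
        exact ⟨hdrop a ((List.takeWhile_prefix _).subset ha), ha⟩
    -- pq after the push loop is a permutation of the affordable part of rem
    have E2' : pq1.Perm ((rem.filter (fun t => decide (t ∈ sitems.take start1))).map pvPair) := by
      refine P2.trans ?_
      refine (hperm.append ((htwperm.symm).map pvPair)).trans ?_
      rw [← List.map_append]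
      refine List.Perm.map _ ?_
      rw [hsplit]
      exact hor.symm
    have E2 : pq1.Perm ((rem.filter (pvAff h)).map pvPair) := by
      rw [← E1]; exact E2'
    have hafford1 : ∀ t ∈ sitems.take start1, ∀ h' ∈ hs, t.1 + 100 ≤ h' := by
      intro t ht h' hh'
      rw [F_take] at ht
      rcases List.mem_append.mp ht with h1 | h1
      · exact hafford t h1 h' (List.mem_cons_of_mem _ hh')
      · have h2 := F_pushed_aff t h1
        have hh := hhead h' hh'
        simp only [pvAff, decide_eq_true_eq] at h2
        omega
    rw [List.foldl_cons, List.foldl_cons]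
    cases hq : pq1 with
    | nil =>
      have hfilnil : rem.filter (pvAff h) = [] := by
        have h0 : ((rem.filter (pvAff h)).map pvPair) = [] := ((hq ▸ E2).symm).eq_nil
        exact List.map_eq_nil_iff.mp h0
      have hbest : pvBest h rem = none := by
        rw [pvBest_filter, hfilnil]
        rfl
      have goalA : pvStepA sitems (start, pq, ans) h = (start1, pq1, ans) := by
        simp only [pvStepA, pvPushLoop_eq]
        rw [← htw, ← hpq1def, hq, ← hk, ← hstart1]
      have goalB : pvStepB (ans, rem) h = (ans, rem) := by
        simp only [pvStepB, hbest]
      rw [goalA, goalB]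
      refine ih start1 pq1 rem ans htail ?_ ?_ hafford1 ?_ hsub
      · rw [hq]; exact List.Pairwise.nil
      · rw [hq, E1, hfilnil]
        exact List.Perm.refl _
      · intro t ht
        rw [F_drop] at ht
        exact hdrop t ((List.dropWhile_sublist _).subset ht)
    | cons x pqt =>
      have hfilne : rem.filter (pvAff h) ≠ [] := by
        intro h0
        rw [h0] at E2
        rw [hq] at E2
        exact absurd E2.eq_nil (by simp)
      obtain ⟨m, hmfold, hmmem, hmmin⟩ := pvBestAff_spec hfilne (remIdx.filter _)
      have hbest : pvBest h rem = some m := by rw [pvBest_filter]; exact hmfold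
      have hmaff : pvAff h m = true := List.of_mem_filter hmmem
      have hmrem : m ∈ rem := List.mem_of_mem_filter hmmem
      have hx_in : x ∈ pq1 := by rw [hq]; exact List.mem_cons_self
      have hxmin : ∀ y ∈ pq1, pvPairLe x y = true := by
        rw [hq]
        intro y hy
        rcases List.mem_cons.mp hy with rfl | hy
        · exact pvPairLe_refl _
        · exact (List.pairwise_cons.mp (hq ▸ P1)).1 y hy
      have hpm_in : pvPair m ∈ pq1 := E2.mem_iff.mpr (List.mem_map_of_mem hmmem)
      have hxm1 : pvPairLe x (pvPair m) = true := hxmin _ hpm_in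
      obtain ⟨t0, ht0mem, ht0eq⟩ := List.mem_map.mp (E2.mem_iff.mp hx_in)
      have hxm2 : pvPairLe (pvPair m) x = true := ht0eq ▸ hmmin t0 ht0mem
      have hxm : x = pvPair m := pvPairLe_antisymm hxm1 hxm2
      have goalA : pvStepA sitems (start, pq, ans) h = (start1, pqt, ans ++ [m.2.2]) := by
        simp only [pvStepA, pvPushLoop_eq]
        rw [← htw, ← hpq1def, hq, ← hk, ← hstart1, hxm]
        rfl
      have goalB : pvStepB (ans, rem) h = (ans ++ [m.2.2], rem.erase m) := by
        simp only [pvStepB, hbest]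
      rw [goalA, goalB]
      have hpqt : pqt.Pairwise (fun a b => pvPairLe a b = true) :=
        (List.pairwise_cons.mp (hq ▸ P1)).2
      have hperm' : pqt.Perm
          (((rem.erase m).filter (fun t => decide (t ∈ sitems.take start1))).map pvPair) := by
        have e3 : ((rem.erase m).filter (fun t => decide (t ∈ sitems.take start1))) =
            ((rem.erase m).filter (pvAff h)) :=
          List.filter_congr (fun t ht => Miff t (List.mem_of_mem_erase ht))
        rw [e3]
        have hr : (rem.filter (pvAff h)).Perm (m :: (rem.erase m).filter (pvAff h)) := by
          have h5 := (List.perm_cons_erase hmrem).filter (pvAff h)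
          rw [List.filter_cons_of_pos hmaff] at h5
          exact h5
        have h6 : pq1.Perm (pvPair m :: ((rem.erase m).filter (pvAff h)).map pvPair) :=
          E2.trans (by simpa using hr.map pvPair)
        rw [hq, hxm] at h6
        exact h6.cons_inv
      have hm_take : m ∈ sitems.take start1 := by
        have h7 := Miff m hmrem
        rw [hmaff] at h7
        simpa using h7
      have hdrop' : ∀ t ∈ sitems.drop start1, t ∈ rem.erase m := by
        intro t ht
        have htn : t ≠ m := by
          intro he
          subst he
          exact (List.disjoint_take_drop SN (le_refl start1)) hm_take ht
        refine (List.mem_erase_of_ne htn).mpr ?_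
        rw [F_drop] at ht
        exact hdrop t ((List.dropWhile_sublist _).subset ht)
      exact ih start1 pqt (rem.erase m) (ans ++ [m.2.2]) htail hpqt hperm' hafford1 hdrop'
        ((List.erase_sublist ..).trans hsub)

-- ===== VERDICT (by name: the statement is the Claim_ definition above) =====
theorem solution_spec : Claim_equal_solution := by
  unfold Claim_equal_solution
  intro healths items _ _
  unfold Spec_solution
  simp only [solution, solution_alt]
  have TI := pvTrips_idx items
  unfold pvTrips at TI
  apply congrArg (fun l => PySem.List.sorted l (fun x => x) false)
  refine pvLoops_eq _ _ (pvSortTrips_pairwise _) TI (pvSortTrips_perm _)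
    (PySem.List.sorted healths (fun x => x) false) 0 [] _ []
    ?_ List.Pairwise.nil ?_ ?_ ?_ (List.Sublist.refl _)
  · simpa using PySem.List.sorted_pairwise healths (fun x => x)
  · simp
  · simp
  · intro t ht
    exact (pvSortTrips_perm _).subset (by simpa using ht)
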